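-- pv_equiv track=rewrite | github.com/swapnilmittal1/asi_final_project | src/data/build_twitter_graphs.py | circles_to_node_membership
-- ===== SOURCE A (Python) =====
-- from typing import Dict, Iterable, List
--
-- def circles_to_node_membership(circles: Dict[int, List[int]]) -> Dict[int, List[int]]:
--     """Invert to ``node_id -> sorted list of circle ids``."""
--     node_to: Dict[int, List[int]] = {}
--     for cid, members in circles.items():
--         for n in members:
--             node_to.setdefault(n, []).append(cid)
--     for n, cids in node_to.items():
--         node_to[n] = sorted(set(cids))
--     return node_to
-- ===== SOURCE B (Python) =====
-- from typing import Dict, List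
--
-- def circles_to_node_membership(circles: Dict[int, List[int]]) -> Dict[int, List[int]]:
--     """Invert to ``node_id -> sorted list of circle ids``, keeping each node's
--     list sorted and duplicate-free by sorted insertion during the single pass
--     (no per-node sorted(set(...)) post-processing)."""
--     node_to: Dict[int, List[int]] = {}
--     for cid, members in circles.items():
--         for n in members:
--             cids = node_to.get(n)
--             if cids is None:
--                 node_to[n] = [cid]
--             else:
--                 i = 0
--                 while i < len(cids) and cids[i] < cid:
--                     i += 1
--                 if i == len(cids) or cids[i] != cid:
--                     cids.insert(i, cid)
--     return node_to
-- ===== Notes on version B (the rewrite author's own statement) =====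
-- stated objective: alternative
-- what changed: B builds each node's circle-id list sorted and duplicate-free by in-place sorted insertion during the single inversion pass, instead of A's append-everything pass followed by a per-node sorted(set(...)) rewrite pass.
import Mathlib
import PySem

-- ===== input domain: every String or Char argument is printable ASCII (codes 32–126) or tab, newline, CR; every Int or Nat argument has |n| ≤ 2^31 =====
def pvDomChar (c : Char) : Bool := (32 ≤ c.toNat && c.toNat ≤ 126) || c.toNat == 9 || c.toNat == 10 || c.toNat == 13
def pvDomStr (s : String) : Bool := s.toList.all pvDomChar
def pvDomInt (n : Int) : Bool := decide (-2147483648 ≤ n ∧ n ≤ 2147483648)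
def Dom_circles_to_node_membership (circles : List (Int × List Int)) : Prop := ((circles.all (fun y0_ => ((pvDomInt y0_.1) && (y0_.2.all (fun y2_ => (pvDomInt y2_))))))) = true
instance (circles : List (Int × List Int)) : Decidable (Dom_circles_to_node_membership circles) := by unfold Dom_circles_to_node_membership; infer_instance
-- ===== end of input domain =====

-- B maintains each node's circle-id list sorted and duplicate-free by sorted insertion
-- during the single inversion pass, instead of A's append pass + per-node sorted(set(...)) pass.
-- The equivalence is about the returned dict (as an insertion-ordered association list).

-- ===== PORT A =====
-- the dict argument: association-list input read with Python-dict semantics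
def circles_to_node_membership (circles : List (Int × List Int)) : List (Int × List Int) :=
  let d : PySem.Dict Int (List Int) := PySem.Dict.ofList circles
  -- for cid, members in circles.items(): for n in members: node_to.setdefault(n, []).append(cid)
  let node_to : PySem.Dict Int (List Int) :=
    d.items.foldl (fun nt p =>
      p.2.foldl (fun nt n => nt.modify n [] (fun cids => cids ++ [p.1])) nt) PySem.Dict.empty
  -- for n, cids in node_to.items(): node_to[n] = sorted(set(cids))
  let node_to2 : PySem.Dict Int (List Int) :=
    node_to.items.foldl (fun nt q =>
      nt.insert q.1 (PySem.List.sorted (PySem.Set.ofList q.2) (fun x => x) false)) node_to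
  node_to2.items

-- ===== PORT B =====
-- the while-loop sorted insertion of Source B: scan past smaller elements, skip an equal one,
-- otherwise insert before the first larger element (or at the end)
def pvInsortU (cid : Int) : List Int → List Int
  | [] => [cid]
  | x :: xs => if x < cid then x :: pvInsortU cid xs
               else if x = cid then x :: xs
               else cid :: x :: xs

def circles_to_node_membership_alt (circles : List (Int × List Int)) : List (Int × List Int) :=
  let d : PySem.Dict Int (List Int) := PySem.Dict.ofList circles
  let node_to : PySem.Dict Int (List Int) :=
    d.items.foldl (fun nt p =>
      p.2.foldl (fun nt n =>
        match nt.get? n with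
        | none => nt.insert n [p.1]
        | some cids => nt.insert n (pvInsortU p.1 cids)) nt) PySem.Dict.empty
  node_to.items

-- ===== PRECONDITION & SPEC =====
def Spec_circles_to_node_membership (circles : List (Int × List Int)) (out : List (Int × List Int)) : Prop := out = circles_to_node_membership_alt circles
instance (circles : List (Int × List Int)) (out : List (Int × List Int)) : Decidable (Spec_circles_to_node_membership circles out) := by unfold Spec_circles_to_node_membership; infer_instance

-- ===== CLAIM (what is proved, stated in full; the proofs are below) =====
def Claim_equal_circles_to_node_membership : Prop := ∀ (circles : List (Int × List Int)), Dom_circles_to_node_membership circles → Spec_circles_to_node_membership circles (circles_to_node_membership circles)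

-- ===== LEMMAS AND PROOFS =====

-- the (node, cid) stream both loops process, in order
def pvPairs (l : List (Int × List Int)) : List (Int × Int) :=
  l.flatMap (fun p => p.2.map (fun n => (n, p.1)))

-- flatten the nested loop over circles into one loop over pvPairs
theorem pvFoldl_flatten (g : PySem.Dict Int (List Int) → Int → Int → PySem.Dict Int (List Int))
    (l : List (Int × List Int)) (d : PySem.Dict Int (List Int)) :
    l.foldl (fun nt p => p.2.foldl (fun nt n => g nt n p.1) nt) d
      = (pvPairs l).foldl (fun nt q => g nt q.1 q.2) d := by
  induction l generalizing d with
  | nil => rfl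
  | cons p l ih =>
    simp only [List.foldl_cons, pvPairs, List.flatMap_cons, List.foldl_append, List.foldl_map]
    rw [ih]
    rfl

theorem pvInsortU_mem (c y : Int) (acc : List Int) :
    y ∈ pvInsortU c acc ↔ y = c ∨ y ∈ acc := by
  induction acc with
  | nil => simp [pvInsortU]
  | cons x xs ih =>
    simp only [pvInsortU]
    split_ifs with h1 h2
    · simp only [List.mem_cons, ih]
      tauto
    · subst h2
      simp only [List.mem_cons]
      tauto
    · simp only [List.mem_cons]

theorem pvInsortU_pairwise (c : Int) (acc : List Int) (h : acc.Pairwise (· < ·)) :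
    (pvInsortU c acc).Pairwise (· < ·) := by
  induction acc with
  | nil => simp [pvInsortU]
  | cons x xs ih =>
    rw [List.pairwise_cons] at h
    simp only [pvInsortU]
    split_ifs with h1 h2
    · rw [List.pairwise_cons]
      refine ⟨fun y hy => ?_, ih h.2⟩
      rcases (pvInsortU_mem c y xs).mp hy with rfl | hy
      · exact h1
      · exact h.1 y hy
    · exact List.pairwise_cons.mpr h
    · rw [List.pairwise_cons]
      refine ⟨fun y hy => ?_, List.pairwise_cons.mpr h⟩
      rcases List.mem_cons.mp hy with rfl | hy
      · omega
      · have := h.1 y hy; omega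

-- B's per-node fold computes exactly A's sorted(set(cids))
theorem pvFoldl_insortU_eq_sorted_set (cs : List Int) :
    cs.foldl (fun acc c => pvInsortU c acc) []
      = PySem.List.sorted (PySem.Set.ofList cs) (fun x => x) false := by
  have key : ∀ (acc : List Int), acc.Pairwise (· < ·) →
      (cs.foldl (fun acc c => pvInsortU c acc) acc).Pairwise (· < ·)
      ∧ (∀ y, y ∈ cs.foldl (fun acc c => pvInsortU c acc) acc ↔ y ∈ acc ∨ y ∈ cs) := by
    induction cs with
    | nil => intro acc h; simpa using h
    | cons c cs ih =>
      intro acc h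
      have h' := pvInsortU_pairwise c acc h
      obtain ⟨hp, hm⟩ := ih (pvInsortU c acc) h'
      refine ⟨hp, fun y => ?_⟩
      rw [List.foldl_cons] at *
      rw [hm y, pvInsortU_mem]
      simp; tauto
  obtain ⟨hp, hm⟩ := key [] (by simp)
  symm
  apply PySem.List.sorted_eq_of_perm_of_pairwise_lt
  · apply (List.perm_ext_iff_of_nodup ?_ (PySem.Set.nodup_ofList cs)).mpr
    · intro y
      rw [hm y, PySem.Set.mem_ofList]
      simp
    · exact hp.imp (fun h => by omega)
  · exact hp

-- per-key value of B's loop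
theorem pvGetD_foldl_insort (l : List (Int × Int)) (d : PySem.Dict Int (List Int)) (n : Int) :
    (l.foldl (fun nt q => nt.insert q.1 (pvInsortU q.2 (nt.getD q.1 []))) d).getD n []
      = ((l.filter (fun q => q.1 == n)).map (·.2)).foldl (fun acc c => pvInsortU c acc) (d.getD n []) := by
  induction l generalizing d with
  | nil => rfl
  | cons q l ih =>
    simp only [List.foldl_cons, List.filter_cons]
    by_cases h : q.1 = n
    · simp only [h, beq_self_eq_true, if_pos, List.map_cons, List.foldl_cons]
      rw [ih]
      rw [PySem.Dict.getD_insert]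
      simp
    · have : (q.1 == n) = false := by simp [h]
      simp only [this, Bool.false_eq_true, if_false]
      rw [ih, PySem.Dict.getD_insert]
      simp [Ne.symm h]

-- B's match-step is an insert of pvInsortU on the current value
theorem pvBstep_eq (nt : PySem.Dict Int (List Int)) (n cid : Int) :
    (match nt.get? n with
      | none => nt.insert n [cid]
      | some cids => nt.insert n (pvInsortU cid cids))
      = nt.insert n (pvInsortU cid (nt.getD n [])) := by
  rcases h : nt.get? n with _ | cids
  · simp [PySem.Dict.getD_eq_get?_getD, h, pvInsortU]
  · simp [PySem.Dict.getD_eq_get?_getD, h]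

theorem pvGetD_foldl_insert_g_absent (g : Int × List Int → List Int) (l : List (Int × List Int))
    (d : PySem.Dict Int (List Int)) (n : Int) (h : n ∉ l.map (·.1)) :
    (l.foldl (fun nt q => nt.insert q.1 (g q)) d).getD n [] = d.getD n [] := by
  induction l generalizing d with
  | nil => rfl
  | cons q l ih =>
    simp only [List.map_cons, List.mem_cons, not_or] at h
    simp only [List.foldl_cons]
    rw [ih _ h.2, PySem.Dict.getD_insert]
    simp [h.1]

theorem pvGetD_foldl_insert_g_mem (g : Int × List Int → List Int) (l : List (Int × List Int))
    (d : PySem.Dict Int (List Int)) (n : Int) (v : List Int)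
    (hnd : (l.map (·.1)).Nodup) (hmem : (n, v) ∈ l) :
    (l.foldl (fun nt q => nt.insert q.1 (g q)) d).getD n [] = g (n, v) := by
  induction l generalizing d with
  | nil => simp at hmem
  | cons q l ih =>
    simp only [List.map_cons, List.nodup_cons] at hnd
    simp only [List.foldl_cons]
    rcases List.mem_cons.mp hmem with rfl | hmem'
    · have habs : n ∉ l.map (·.1) := by simpa using hnd.1
      rw [pvGetD_foldl_insert_g_absent g l _ n habs, PySem.Dict.getD_insert]
      simp
    · have hq : q.1 ≠ n := by
        intro he
        exact hnd.1 (by simpa [he] using List.mem_map_of_mem (f := (·.1)) hmem')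
      exact ih _ hnd.2 hmem'

-- Set.update of a set by itself is itself
theorem pvSet_update_self (s : PySem.Set Int) : PySem.Set.update s s = s := by
  rw [PySem.Set.update_eq_append_filter]
  have : (PySem.Set.ofList s).filter (fun y => !(PySem.Set.contains s y)) = [] := by
    apply List.filter_eq_nil_iff.mpr
    intro y hy
    have hys : y ∈ s := (PySem.Set.mem_ofList _ _).mp hy
    simp
    exact hys
  rw [this, List.append_nil]

-- ===== main proof =====
theorem pv_main (circles : List (Int × List Int)) :
    circles_to_node_membership circles = circles_to_node_membership_alt circles := by
  unfold circles_to_node_membership circles_to_node_membership_alt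
  simp only []
  set d := PySem.Dict.ofList circles with hd
  set ps := pvPairs d.items with hps
  -- flatten both nested loops
  rw [pvFoldl_flatten (fun nt n cid => nt.modify n [] (fun cids => cids ++ [cid]))]
  rw [pvFoldl_flatten (fun nt n cid =>
        match nt.get? n with
        | none => nt.insert n [cid]
        | some cids => nt.insert n (pvInsortU cid cids))]
  -- replace B's match step by the insert form
  have hBfun : (fun (nt : PySem.Dict Int (List Int)) (q : Int × Int) =>
        match nt.get? q.1 with
        | none => nt.insert q.1 [q.2]
        | some cids => nt.insert q.1 (pvInsortU q.2 cids))
      = fun nt q => nt.insert q.1 (pvInsortU q.2 (nt.getD q.1 [])) := by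
    funext nt q; exact pvBstep_eq nt q.1 q.2
  rw [hBfun]
  set dA := ps.foldl (fun nt q => nt.modify q.1 [] (fun cids => cids ++ [q.2])) PySem.Dict.empty with hdA
  set dB := ps.foldl (fun nt q => nt.insert q.1 (pvInsortU q.2 (nt.getD q.1 []))) PySem.Dict.empty with hdB
  -- keys of both loops: the distinct nodes, in first-appearance order
  have hkA : dA.keys = PySem.Set.ofList (ps.map (·.1)) := by
    rw [hdA, PySem.Dict.keys_foldl_modify_key]
    exact PySem.Set.update_empty _
  have hkB : dB.keys = PySem.Set.ofList (ps.map (·.1)) := by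
    rw [hdB, PySem.Dict.keys_foldl_insert_key]
    exact PySem.Set.update_empty _
  have hndA : dA.keys.Nodup := by rw [hkA]; exact PySem.Set.nodup_ofList _
  have hndB : dB.keys.Nodup := by rw [hkB]; exact PySem.Set.nodup_ofList _
  -- per-key values
  have hvA : ∀ n, dA.getD n [] = ((ps.filter (fun q => q.1 == n)).map (·.2)) := by
    intro n
    rw [hdA, PySem.Dict.getD_foldl_modify_append]
    simp
  have hvB : ∀ n, dB.getD n []
      = PySem.List.sorted (PySem.Set.ofList ((ps.filter (fun q => q.1 == n)).map (·.2))) (fun x => x) false := by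
    intro n
    rw [hdB, pvGetD_foldl_insort]
    simp only [PySem.Dict.getD_empty]
    exact pvFoldl_insortU_eq_sorted_set _
  -- A's rewrite loop: same keys, value g (n, dA.getD n [])
  set d2 := dA.items.foldl (fun nt q =>
      nt.insert q.1 (PySem.List.sorted (PySem.Set.ofList q.2) (fun x => x) false)) dA with hd2
  have hk2 : d2.keys = dA.keys := by
    rw [hd2, PySem.Dict.keys_foldl_insert_key]
    have : dA.items.map (·.1) = dA.keys := rfl
    rw [this, pvSet_update_self]
  have hnd2 : d2.keys.Nodup := by rw [hk2]; exact hndA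
  have hitemsA : dA.items = dA.keys.map (fun n => (n, dA.getD n [])) :=
    PySem.Dict.items_eq_map_keys dA hndA []
  have hndfst : (dA.items.map (·.1)).Nodup := hndA
  have hv2 : ∀ n ∈ dA.keys, d2.getD n []
      = PySem.List.sorted (PySem.Set.ofList (dA.getD n [])) (fun x => x) false := by
    intro n hn
    have hmem : (n, dA.getD n []) ∈ dA.items := by
      rw [hitemsA]; exact List.mem_map_of_mem hn
    exact pvGetD_foldl_insert_g_mem
      (fun q => PySem.List.sorted (PySem.Set.ofList q.2) (fun x => x) false)
      dA.items dA n (dA.getD n []) hndfst hmem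
  -- items of both results agree
  rw [PySem.Dict.items_eq_map_keys d2 hnd2 [], PySem.Dict.items_eq_map_keys dB hndB []]
  rw [hk2, hkA, hkB]
  apply List.map_congr_left
  intro n hn
  have hn' : n ∈ dA.keys := by rw [hkA]; exact hn
  rw [hv2 n hn', hvB n, hvA n]

-- ===== VERDICT (by name: the statement is the Claim_ definition above) =====
theorem circles_to_node_membership_spec : Claim_equal_circles_to_node_membership := by
  intro circles _
  unfold Spec_circles_to_node_membership
  exact pv_main circles
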